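-- pv_equiv track=rewrite | github.com/pypi-data/pypi-mirror-369 | packages/hwinfo-tui/hwinfo_tui-1.0.1-py3-none-any.whl/hwinfo_tui/utils/units.py | suggest_sensor_names
-- ===== SOURCE A (Python) =====
-- def suggest_sensor_names(available_sensors: list[str], query: str, limit: int = 5) -> list[str]:
--     """Suggest sensor names based on partial input."""
--     query_lower = query.lower()
--     suggestions = []
--
--     # Exact matches first
--     for sensor in available_sensors:
--         if query_lower == sensor.lower():
--             suggestions.append(sensor)
--
--     # Starts with matches
--     for sensor in available_sensors:
--         if sensor.lower().startswith(query_lower) and sensor not in suggestions: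
--             if len(suggestions) >= limit:
--                 break
--             suggestions.append(sensor)
--
--     # Contains matches
--     for sensor in available_sensors:
--         if query_lower in sensor.lower() and sensor not in suggestions:
--             if len(suggestions) >= limit:
--                 break
--             suggestions.append(sensor)
--
--     return suggestions
-- ===== SOURCE B (Python) =====
-- def suggest_sensor_names(available_sensors: list[str], query: str, limit: int = 5) -> list[str]:
--     """Suggest sensor names based on partial input (single classify pass + one fill pass)."""
--     q = query.lower()
--     exact, pref, cont = [], [], []
--     for sensor in available_sensors:
--         sl = sensor.lower()
--         if sl == q:
--             exact.append(sensor)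
--         elif sl.startswith(q):
--             pref.append(sensor)
--         elif q in sl:
--             cont.append(sensor)
--     result = exact
--     for sensor in pref + cont:
--         if len(result) >= limit:
--             break
--         if sensor not in result:
--             result.append(sensor)
--     return result
-- ===== Notes on version B (the rewrite author's own statement) =====
-- stated objective: simpler
-- what changed: Replaces A's three full scans of available_sensors (each redoing lowercase/dedup/limit logic) by one classification pass into exact/prefix/contains buckets followed by a single dedup-and-limit fill pass over the two capped buckets.
import Mathlib
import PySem

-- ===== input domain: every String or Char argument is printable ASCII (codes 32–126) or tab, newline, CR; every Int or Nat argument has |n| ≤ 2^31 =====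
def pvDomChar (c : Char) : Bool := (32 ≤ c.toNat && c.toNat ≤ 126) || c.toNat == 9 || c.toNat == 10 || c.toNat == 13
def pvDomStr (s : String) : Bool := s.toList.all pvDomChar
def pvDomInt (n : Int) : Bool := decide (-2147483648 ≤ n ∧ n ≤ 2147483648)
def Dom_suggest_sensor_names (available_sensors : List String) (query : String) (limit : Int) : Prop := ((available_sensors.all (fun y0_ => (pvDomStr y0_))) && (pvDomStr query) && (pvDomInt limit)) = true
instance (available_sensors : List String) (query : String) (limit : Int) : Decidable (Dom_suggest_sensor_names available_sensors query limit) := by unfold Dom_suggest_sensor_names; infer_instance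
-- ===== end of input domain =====

-- B replaces A's three full scans by one classification pass into three buckets plus one fill pass (objective: simpler).

-- ===== PORT A =====
-- 'for sensor in …: if query_lower == sensor.lower(): suggestions.append(sensor)'
def aExactLoop (q : String) : List String → List String → List String
  | [], acc => acc
  | s :: rest, acc =>
    if q == PySem.Str.lower s then aExactLoop q rest (acc ++ [s])
    else aExactLoop q rest acc

-- the 'starts with' loop, with Python's break
def aPrefLoop (q : String) (limit : Int) : List String → List String → List String
  | [], acc => acc
  | s :: rest, acc =>
    if PySem.Str.startswith (PySem.Str.lower s) q && !acc.contains s then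
      if (acc.length : Int) ≥ limit then acc
      else aPrefLoop q limit rest (acc ++ [s])
    else aPrefLoop q limit rest acc

-- the 'contains' loop, with Python's break
def aContLoop (q : String) (limit : Int) : List String → List String → List String
  | [], acc => acc
  | s :: rest, acc =>
    if PySem.Str.isIn q (PySem.Str.lower s) && !acc.contains s then
      if (acc.length : Int) ≥ limit then acc
      else aContLoop q limit rest (acc ++ [s])
    else aContLoop q limit rest acc

def suggest_sensor_names (available_sensors : List String) (query : String) (limit : Int) : List String :=
  let ql := PySem.Str.lower query
  aContLoop ql limit available_sensors (aPrefLoop ql limit available_sensors (aExactLoop ql available_sensors []))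

-- ===== PORT B =====
-- one pass: classify each sensor into (exact, prefix, contains) buckets
def bClassify (q : String) : List String → List String × List String × List String → List String × List String × List String
  | [], b => b
  | s :: rest, (e, p, c) =>
    let sl := PySem.Str.lower s
    if sl == q then bClassify q rest (e ++ [s], p, c)
    else if PySem.Str.startswith sl q then bClassify q rest (e, p ++ [s], c)
    else if PySem.Str.isIn q sl then bClassify q rest (e, p, c ++ [s])
    else bClassify q rest (e, p, c)

-- one pass: append unseen values while under the limit
def bFill (limit : Int) : List String → List String → List String
  | [], acc => acc
  | s :: rest, acc =>
    if (acc.length : Int) ≥ limit then acc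
    else if acc.contains s then bFill limit rest acc
    else bFill limit rest (acc ++ [s])

def suggest_sensor_names_alt (available_sensors : List String) (query : String) (limit : Int) : List String :=
  let ql := PySem.Str.lower query
  let (e, p, c) := bClassify ql available_sensors ([], [], [])
  bFill limit (p ++ c) e

-- ===== PRECONDITION & SPEC =====
def Spec_suggest_sensor_names (available_sensors : List String) (query : String) (limit : Int) (out : List String) : Prop := out = suggest_sensor_names_alt available_sensors query limit
instance (available_sensors : List String) (query : String) (limit : Int) (out : List String) : Decidable (Spec_suggest_sensor_names available_sensors query limit out) := by unfold Spec_suggest_sensor_names; infer_instance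

-- ===== CLAIM (what is proved, stated in full; the proofs are below) =====
def Claim_equal_suggest_sensor_names : Prop := ∀ (available_sensors : List String) (query : String) (limit : Int), Dom_suggest_sensor_names available_sensors query limit → Spec_suggest_sensor_names available_sensors query limit (suggest_sensor_names available_sensors query limit)

-- ===== LEMMAS AND PROOFS =====

-- the three classification predicates, as filters
def eFilter (q : String) (l : List String) : List String :=
  l.filter (fun s => PySem.Str.lower s == q)
def pFilter (q : String) (l : List String) : List String :=
  l.filter (fun s => !(PySem.Str.lower s == q) && PySem.Str.startswith (PySem.Str.lower s) q)
def cFilter (q : String) (l : List String) : List String :=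
  l.filter (fun s => !(PySem.Str.lower s == q) && !(PySem.Str.startswith (PySem.Str.lower s) q) && PySem.Str.isIn q (PySem.Str.lower s))

theorem aExactLoop_eq (q : String) (l : List String) (acc : List String) :
    aExactLoop q l acc = acc ++ eFilter q l := by
  induction l generalizing acc with
  | nil => simp [aExactLoop, eFilter]
  | cons s rest ih =>
    simp only [aExactLoop, eFilter, List.filter_cons]
    by_cases h : PySem.Str.lower s = q
    · simp [h, ih, eFilter]
    · have h1 : (q == PySem.Str.lower s) = false := by simp [Ne.symm h]
      have h2 : (PySem.Str.lower s == q) = false := by simp [h]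
      simp [h1, h2, ih, eFilter]

theorem bClassify_eq (q : String) (l : List String) (e p c : List String) :
    bClassify q l (e, p, c) = (e ++ eFilter q l, p ++ pFilter q l, c ++ cFilter q l) := by
  induction l generalizing e p c with
  | nil => simp [bClassify, eFilter, pFilter, cFilter]
  | cons s rest ih =>
    simp only [bClassify, eFilter, pFilter, cFilter, List.filter_cons]
    by_cases h1 : PySem.Str.lower s = q
    · simp [h1, ih, eFilter, pFilter, cFilter]
    · by_cases h2 : PySem.Chars.startswith (PySem.Chars.lower s.toList) q.toList = true
      · simp [h1, h2, ih, eFilter, pFilter, cFilter]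
      · by_cases h3 : PySem.Chars.isIn q.toList (PySem.Chars.lower s.toList) = true
        · simp [h1, h2, h3, ih, eFilter, pFilter, cFilter]
        · simp [h1, h2, h3, ih, eFilter, pFilter, cFilter]

theorem aPrefLoop_of_limit (q : String) (limit : Int) (l acc : List String)
    (h : (acc.length : Int) ≥ limit) : aPrefLoop q limit l acc = acc := by
  induction l with
  | nil => rfl
  | cons s rest ih => simp [aPrefLoop, h, ih]

theorem aContLoop_of_limit (q : String) (limit : Int) (l acc : List String)
    (h : (acc.length : Int) ≥ limit) : aContLoop q limit l acc = acc := by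
  induction l with
  | nil => rfl
  | cons s rest ih => simp [aContLoop, h, ih]

theorem bFill_of_limit (limit : Int) (l acc : List String)
    (h : (acc.length : Int) ≥ limit) : bFill limit l acc = acc := by
  induction l with
  | nil => rfl
  | cons s rest ih => simp [bFill, h]

theorem bFill_append (limit : Int) (l1 l2 acc : List String) :
    bFill limit (l1 ++ l2) acc = bFill limit l2 (bFill limit l1 acc) := by
  induction l1 generalizing acc with
  | nil => rfl
  | cons s rest ih =>
    simp only [List.cons_append, bFill]
    by_cases h : (acc.length : Int) ≥ limit
    · rw [if_pos h, if_pos h, bFill_of_limit limit l2 acc h]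
    · rw [if_neg h, if_neg h]
      by_cases h2 : acc.contains s = true
      · rw [if_pos h2, if_pos h2, ih]
      · rw [if_neg h2, if_neg h2, ih]

theorem mem_bFill (limit : Int) (l acc : List String) (x : String) (hx : x ∈ acc) :
    x ∈ bFill limit l acc := by
  induction l generalizing acc with
  | nil => simpa [bFill]
  | cons s rest ih =>
    simp only [bFill]
    split
    · exact hx
    · split
      · exact ih acc hx
      · exact ih (acc ++ [s]) (by simp [hx])

theorem mem_or_limit_bFill (limit : Int) (l acc : List String) (x : String) (hx : x ∈ l) :
    x ∈ bFill limit l acc ∨ ((bFill limit l acc).length : Int) ≥ limit := by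
  induction l generalizing acc with
  | nil => simp at hx
  | cons s rest ih =>
    simp only [bFill]
    by_cases h : (acc.length : Int) ≥ limit
    · rw [if_pos h]; exact Or.inr h
    · rw [if_neg h]
      rcases List.mem_cons.mp hx with rfl | hx'
      · by_cases h2 : acc.contains x = true
        · rw [if_pos h2]; exact Or.inl (mem_bFill _ _ _ _ (by simpa using h2))
        · rw [if_neg h2]; exact Or.inl (mem_bFill _ _ _ _ (by simp))
      · by_cases h2 : acc.contains s = true
        · rw [if_pos h2]; exact ih acc hx'
        · rw [if_neg h2]; exact ih (acc ++ [s]) hx'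

theorem aPrefLoop_eq_bFill (q : String) (limit : Int) (l acc : List String)
    (H : ∀ s ∈ l, PySem.Str.lower s = q → s ∈ acc) :
    aPrefLoop q limit l acc = bFill limit (pFilter q l) acc := by
  induction l generalizing acc with
  | nil => rfl
  | cons s rest ih =>
    have Hrest : ∀ t ∈ rest, PySem.Str.lower t = q → t ∈ acc :=
      fun t ht => H t (List.mem_cons_of_mem s ht)
    simp only [aPrefLoop, pFilter, List.filter_cons]
    by_cases h1 : PySem.Str.lower s = q
    · -- exact-class sensor: already in acc, so A skips it; not in the prefix bucket
      have hm : s ∈ acc := H s List.mem_cons_self h1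
      rw [if_neg (show ¬((PySem.Str.startswith (PySem.Str.lower s) q && !acc.contains s) = true) by simp [hm]),
          if_neg (show ¬((!(PySem.Str.lower s == q) && PySem.Str.startswith (PySem.Str.lower s) q) = true) by simp [h1])]
      exact ih acc Hrest
    · by_cases h2 : PySem.Str.startswith (PySem.Str.lower s) q = true
      · have h2' : PySem.Chars.startswith (PySem.Chars.lower s.toList) q.toList = true := by
          simpa using h2
        rw [if_pos (show (!(PySem.Str.lower s == q) && PySem.Str.startswith (PySem.Str.lower s) q) = true by simp [h1, h2'])]
        by_cases h3 : acc.contains s = true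
        · have hm3 : s ∈ acc := by simpa using h3
          rw [if_neg (show ¬((PySem.Str.startswith (PySem.Str.lower s) q && !acc.contains s) = true) by simp [hm3])]
          simp only [bFill]
          by_cases h4 : (acc.length : Int) ≥ limit
          · rw [if_pos h4, aPrefLoop_of_limit q limit rest acc h4]
          · rw [if_neg h4, if_pos h3]
            exact ih acc Hrest
        · have hm3 : s ∉ acc := by simpa using h3
          rw [if_pos (show (PySem.Str.startswith (PySem.Str.lower s) q && !acc.contains s) = true by simp [h2', hm3])]
          simp only [bFill]
          by_cases h4 : (acc.length : Int) ≥ limit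
          · rw [if_pos h4, if_pos h4]
          · rw [if_neg h4, if_neg h4, if_neg h3]
            exact ih (acc ++ [s]) (fun t ht hq => List.mem_append_left _ (Hrest t ht hq))
      · have h2' : PySem.Chars.startswith (PySem.Chars.lower s.toList) q.toList = false := by
          simpa using h2
        rw [if_neg (show ¬((PySem.Str.startswith (PySem.Str.lower s) q && !acc.contains s) = true) by simp [h2']),
            if_neg (show ¬((!(PySem.Str.lower s == q) && PySem.Str.startswith (PySem.Str.lower s) q) = true) by simp [h2'])]
        exact ih acc Hrest

theorem startswith_isIn (q t : String) (h : PySem.Str.startswith t q = true) :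
    PySem.Str.isIn q t = true := by
  rw [PySem.Str.isIn_iff_infix]
  exact ((PySem.Chars.startswith_iff _ _).mp (by simpa using h)).isInfix

theorem aContLoop_eq_bFill (q : String) (limit : Int) (l acc : List String)
    (H1 : ∀ s ∈ l, PySem.Str.lower s = q → s ∈ acc)
    (H2 : ∀ s ∈ l, PySem.Str.lower s ≠ q → PySem.Str.startswith (PySem.Str.lower s) q = true →
          s ∈ acc ∨ (acc.length : Int) ≥ limit) :
    aContLoop q limit l acc = bFill limit (cFilter q l) acc := by
  induction l generalizing acc with
  | nil => rfl
  | cons s rest ih =>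
    have H1r : ∀ t ∈ rest, PySem.Str.lower t = q → t ∈ acc :=
      fun t ht => H1 t (List.mem_cons_of_mem s ht)
    have H2r : ∀ t ∈ rest, PySem.Str.lower t ≠ q → PySem.Str.startswith (PySem.Str.lower t) q = true →
        t ∈ acc ∨ (acc.length : Int) ≥ limit :=
      fun t ht => H2 t (List.mem_cons_of_mem s ht)
    simp only [aContLoop, cFilter, List.filter_cons]
    by_cases h1 : PySem.Str.lower s = q
    · -- exact-class sensor: already in acc, so A skips it; not in the contains bucket
      have hm : s ∈ acc := H1 s List.mem_cons_self h1
      rw [if_neg (show ¬((PySem.Str.isIn q (PySem.Str.lower s) && !acc.contains s) = true) by simp [hm]),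
          if_neg (show ¬((!(PySem.Str.lower s == q) && !(PySem.Str.startswith (PySem.Str.lower s) q) && PySem.Str.isIn q (PySem.Str.lower s)) = true) by simp [h1])]
      exact ih acc H1r H2r
    · by_cases h2 : PySem.Str.startswith (PySem.Str.lower s) q = true
      · -- prefix-class sensor: in acc already, or the limit is reached; not in the contains bucket
        have h2' : PySem.Chars.startswith (PySem.Chars.lower s.toList) q.toList = true := by
          simpa using h2
        have hin : PySem.Chars.isIn q.toList (PySem.Chars.lower s.toList) = true := by
          simpa using startswith_isIn q _ h2
        rw [if_neg (show ¬((!(PySem.Str.lower s == q) && !(PySem.Str.startswith (PySem.Str.lower s) q) && PySem.Str.isIn q (PySem.Str.lower s)) = true) by simp [h2'])]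
        rcases H2 s List.mem_cons_self h1 h2 with hs | hlim
        · rw [if_neg (show ¬((PySem.Str.isIn q (PySem.Str.lower s) && !acc.contains s) = true) by simp [hs])]
          exact ih acc H1r H2r
        · by_cases h3 : acc.contains s = true
          · have hm3 : s ∈ acc := by simpa using h3
            rw [if_neg (show ¬((PySem.Str.isIn q (PySem.Str.lower s) && !acc.contains s) = true) by simp [hm3])]
            exact ih acc H1r H2r
          · have hm3 : s ∉ acc := by simpa using h3
            rw [if_pos (show (PySem.Str.isIn q (PySem.Str.lower s) && !acc.contains s) = true by simp [hin, hm3]),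
                if_pos hlim]
            exact (bFill_of_limit limit _ acc hlim).symm
      · have h2' : PySem.Chars.startswith (PySem.Chars.lower s.toList) q.toList = false := by
          simpa using h2
        by_cases h3 : PySem.Str.isIn q (PySem.Str.lower s) = true
        · -- genuine contains candidate: both sides treat it identically
          have h3' : PySem.Chars.isIn q.toList (PySem.Chars.lower s.toList) = true := by
            simpa using h3
          rw [if_pos (show (!(PySem.Str.lower s == q) && !(PySem.Str.startswith (PySem.Str.lower s) q) && PySem.Str.isIn q (PySem.Str.lower s)) = true by simp [h1, h2', h3'])]
          by_cases h4 : acc.contains s = true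
          · have hm4 : s ∈ acc := by simpa using h4
            rw [if_neg (show ¬((PySem.Str.isIn q (PySem.Str.lower s) && !acc.contains s) = true) by simp [hm4])]
            simp only [bFill]
            by_cases h5 : (acc.length : Int) ≥ limit
            · rw [if_pos h5, aContLoop_of_limit q limit rest acc h5]
            · rw [if_neg h5, if_pos h4]
              exact ih acc H1r H2r
          · have hm4 : s ∉ acc := by simpa using h4
            rw [if_pos (show (PySem.Str.isIn q (PySem.Str.lower s) && !acc.contains s) = true by simp [h3', hm4])]
            simp only [bFill]
            by_cases h5 : (acc.length : Int) ≥ limit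
            · rw [if_pos h5, if_pos h5]
            · rw [if_neg h5, if_neg h5, if_neg h4]
              refine ih (acc ++ [s]) (fun t ht hq => List.mem_append_left _ (H1r t ht hq)) ?_
              intro t ht htq hts
              rcases H2r t ht htq hts with h | h
              · exact Or.inl (List.mem_append_left _ h)
              · right; simp; omega
        · have h3' : PySem.Chars.isIn q.toList (PySem.Chars.lower s.toList) = false := by
            simpa using h3
          rw [if_neg (show ¬((PySem.Str.isIn q (PySem.Str.lower s) && !acc.contains s) = true) by simp [h3']),
              if_neg (show ¬((!(PySem.Str.lower s == q) && !(PySem.Str.startswith (PySem.Str.lower s) q) && PySem.Str.isIn q (PySem.Str.lower s)) = true) by simp [h3'])]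
          exact ih acc H1r H2r

-- ===== VERDICT (by name: the statement is the Claim_ definition above) =====
theorem suggest_sensor_names_spec : Claim_equal_suggest_sensor_names := by
  intro l query limit _
  unfold Spec_suggest_sensor_names suggest_sensor_names suggest_sensor_names_alt
  set q := PySem.Str.lower query with hq
  show aContLoop q limit l (aPrefLoop q limit l (aExactLoop q l [])) =
    (match bClassify q l ([], [], []) with
     | (e, p, c) => bFill limit (p ++ c) e)
  rw [bClassify_eq, aExactLoop_eq]
  simp only [List.nil_append]
  have hE : ∀ s ∈ l, PySem.Str.lower s = q → s ∈ eFilter q l := by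
    intro s hs h; simp [eFilter, List.mem_filter, hs, h]
  rw [aPrefLoop_eq_bFill q limit l (eFilter q l) hE]
  have hM1 : ∀ s ∈ l, PySem.Str.lower s = q → s ∈ bFill limit (pFilter q l) (eFilter q l) :=
    fun s hs h => mem_bFill _ _ _ _ (hE s hs h)
  have hM2 : ∀ s ∈ l, PySem.Str.lower s ≠ q → PySem.Str.startswith (PySem.Str.lower s) q = true →
      s ∈ bFill limit (pFilter q l) (eFilter q l) ∨
      ((bFill limit (pFilter q l) (eFilter q l)).length : Int) ≥ limit := by
    intro s hs h1 h2
    have : s ∈ pFilter q l := by simp [pFilter, List.mem_filter, hs, h1, (by simpa using h2 : PySem.Chars.startswith (PySem.Chars.lower s.toList) q.toList = true)]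
    exact mem_or_limit_bFill limit (pFilter q l) (eFilter q l) s this
  rw [aContLoop_eq_bFill q limit l _ hM1 hM2, ← bFill_append]
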